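-- pv_equiv track=rewrite | github.com/AlbertVeli/AdventOfCode | 2025/06/day6_2.py | transpose_and_group
-- ===== SOURCE A (Python) =====
-- def transpose_and_group(lines: list[str]) -> list[list[str]]:
--     '''
--     Transpose the whole grid and split into groups on blank columns.
--
--     Returns a list of groups, where each group is a list of column-strings,
--     e.g. ['623+', '431 ', '  4 '] for one 'problem'.
--     '''
--     width = max(len(line) for line in lines)
--     grid = [line.ljust(width) for line in lines]
--     height = len(grid)
--
--     # Transpose: each entry is a full vertical column as a string
--     cols = [''.join(grid[r][c] for r in range(height)) for c in range(width)]
--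
--     groups = []
--     current = []
--     for col in cols:
--         if col.strip() == '':          # blank column = separator
--             if current:
--                 groups.append(current)
--                 current = []
--         else:
--             current.append(col)
--     if current:
--         groups.append(current)
--
--     return groups
-- ===== SOURCE B (Python) =====
-- def transpose_and_group(lines: list[str]) -> list[list[str]]:
--     '''Blank-column detection first, then split 0..width into maximal runs
--     of non-blank columns and build each group from its run of indices.'''
--     width = max(len(line) for line in lines)
--     height = len(lines)
--
--     def cell(r, c):
--         line = lines[r]
--         return line[c] if c < len(line) else ' '
--
--     # which columns are blank (all cells whitespace)
--     blank = [all(cell(r, c).isspace() for r in range(height)) for c in range(width)]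
--
--     # maximal contiguous runs [c, e) of non-blank columns
--     runs = []
--     c = 0
--     while c < width:
--         if blank[c]:
--             c += 1
--         else:
--             e = c
--             while e < width and not blank[e]:
--                 e += 1
--             runs.append((c, e))
--             c = e
--
--     return [[''.join(cell(r, j) for r in range(height)) for j in range(c0, c1)]
--             for (c0, c1) in runs]
-- ===== Notes on version B (the rewrite author's own statement) =====
-- stated objective: alternative
-- what changed: Instead of materialising the transposed column list and splitting it with a groups/current accumulator fold, B first computes a blank-column bitmap, then extracts maximal runs of non-blank column indices, and finally builds each group's column strings directly from its index run; the fold accumulator disappears.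
import Mathlib
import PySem

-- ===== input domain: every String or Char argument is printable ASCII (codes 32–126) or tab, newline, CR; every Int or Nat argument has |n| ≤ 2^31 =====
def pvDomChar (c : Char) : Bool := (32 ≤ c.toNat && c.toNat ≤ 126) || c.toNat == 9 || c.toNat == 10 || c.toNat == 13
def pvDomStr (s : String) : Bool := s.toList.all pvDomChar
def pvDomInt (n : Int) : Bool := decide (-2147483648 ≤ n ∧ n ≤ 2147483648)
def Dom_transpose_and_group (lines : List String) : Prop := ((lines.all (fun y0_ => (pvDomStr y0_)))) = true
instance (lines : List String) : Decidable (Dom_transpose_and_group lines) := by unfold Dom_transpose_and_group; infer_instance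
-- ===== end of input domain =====

-- B replaces A's fold over the transposed column list (groups/current accumulator) by a
-- blank-column bitmap, maximal runs of non-blank column indices, and per-run group building
-- (objective: alternative decomposition, same cost).

-- ===== PORT A =====
-- grid[r][c]: r,c are always in range in Python, so List.getD with defaults is exact
def aCol (grid : List (List Char)) (height c : Nat) : String :=
  String.ofList ((List.range height).map (fun r => (grid.getD r []).getD c ' '))

def aStep (acc : List (List String) × List String) (col : String) :
    List (List String) × List String :=
  if PySem.Str.strip col = "" then
    (if acc.2 = [] then acc else (acc.1 ++ [acc.2], []))
  else (acc.1, acc.2 ++ [col])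

def transpose_and_group (lines : List String) : List (List String) :=
  -- width = max(...) raises ValueError on lines = []; Pre_ excludes that input (getD 0 is never read inside Pre_)
  let width := (PySem.List.max? (lines.map (fun l : String => l.toList.length)) (fun n => n)).getD 0
  let grid := lines.map (fun l => l.toList ++ List.replicate (width - l.toList.length) ' ')
  let height := grid.length
  let cols := (List.range width).map (aCol grid height)
  let res := cols.foldl aStep ([], [])
  if res.2 = [] then res.1 else res.1 ++ [res.2]

-- ===== PORT B =====
def bCell (lines : List String) (r c : Nat) : Char :=
  if c < (lines.getD r "").toList.length then (lines.getD r "").toList.getD c ' ' else ' '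

def bBlank (lines : List String) (height c : Nat) : Bool :=
  (List.range height).all (fun r => PySem.Chars.isspace (bCell lines r c))

def bColStr (lines : List String) (height c : Nat) : String :=
  String.ofList ((List.range height).map (fun r => bCell lines r c))

-- the inner `while e < width and not blank[e]: e += 1`
def bRunEnd (blanks : List Bool) (width e : Nat) : Nat :=
  if e < width ∧ blanks.getD e true = false then bRunEnd blanks width (e + 1) else e
termination_by width - e
decreasing_by omega

theorem bRunEnd_le (blanks : List Bool) (width e : Nat) : e ≤ bRunEnd blanks width e := by
  rw [bRunEnd]
  split
  · have := bRunEnd_le blanks width (e + 1); omega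
  · omega
termination_by width - e
decreasing_by omega

theorem bRunEnd_gt (blanks : List Bool) (width c : Nat) (h1 : c < width)
    (h2 : blanks.getD c true = false) : c < bRunEnd blanks width c := by
  rw [bRunEnd, if_pos ⟨h1, h2⟩]
  have := bRunEnd_le blanks width (c + 1)
  omega

-- the outer `while c < width` loop collecting index runs
def bRuns (blanks : List Bool) (width c : Nat) : List (Nat × Nat) :=
  if h : c < width then
    if blanks.getD c true then bRuns blanks width (c + 1)
    else
      let e := bRunEnd blanks width c
      (c, e) :: bRuns blanks width e
  else []
termination_by width - c
decreasing_by
  · omega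
  · rename_i hb
    have hb' : blanks.getD c true = false := by
      revert hb; cases blanks.getD c true <;> simp
    have := bRunEnd_gt blanks width c h hb'; omega

-- range(c0, c1) ported by hand as List.range' c0 (c1 - c0) (exact on Nat bounds)
def bGroup (lines : List String) (height : Nat) (r : Nat × Nat) : List String :=
  (List.range' r.1 (r.2 - r.1)).map (fun c => bColStr lines height c)

def transpose_and_group_alt (lines : List String) : List (List String) :=
  let width := (PySem.List.max? (lines.map (fun l : String => l.toList.length)) (fun n => n)).getD 0
  let height := lines.length
  let blanks := (List.range width).map (bBlank lines height)
  (bRuns blanks width 0).map (bGroup lines height)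

-- ===== PRECONDITION & SPEC =====
-- Pre_ excludes exactly lines = [], where Python's max() (in both A and B) raises ValueError
def Pre_transpose_and_group (lines : List String) : Prop := lines ≠ []
instance (lines : List String) : Decidable (Pre_transpose_and_group lines) := by
  unfold Pre_transpose_and_group; infer_instance

def pvWitness_transpose_and_group : List String := ["62 1", "43 2", "  +."]

def Spec_transpose_and_group (lines : List String) (out : List (List String)) : Prop :=
  out = transpose_and_group_alt lines
instance (lines : List String) (out : List (List String)) :
    Decidable (Spec_transpose_and_group lines out) := by
  unfold Spec_transpose_and_group; infer_instance

-- ===== CLAIM (what is proved, stated in full; the proofs are below) =====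
def Claim_equal_transpose_and_group : Prop :=
  ∀ (lines : List String), Dom_transpose_and_group lines → Pre_transpose_and_group lines →
    Spec_transpose_and_group lines (transpose_and_group lines)

-- ===== LEMMAS AND PROOFS =====

-- blank test bridge: Python's `col.strip() == ''` is `all chars isspace`
theorem strip_eq_nil_iff (cs : List Char) :
    PySem.Chars.strip cs = [] ↔ cs.all PySem.Chars.isspace := by
  unfold PySem.Chars.strip PySem.Chars.rstrip PySem.Chars.lstrip
  constructor
  · intro h
    have h' : List.dropWhile PySem.Chars.isspace
        ((List.dropWhile PySem.Chars.isspace cs).reverse) = [] := by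
      simpa using h
    rw [List.dropWhile_eq_nil_iff] at h'
    simp only [List.all_eq_true]
    intro x hx
    by_cases hm : x ∈ List.dropWhile PySem.Chars.isspace cs
    · exact h' x (by simpa using hm)
    · have : cs = List.takeWhile PySem.Chars.isspace cs ++ List.dropWhile PySem.Chars.isspace cs :=
        (List.takeWhile_append_dropWhile).symm
      rw [this] at hx
      rcases List.mem_append.mp hx with h1 | h1
      · exact List.mem_takeWhile_imp h1
      · exact absurd h1 hm
  · intro h
    have : List.dropWhile PySem.Chars.isspace cs = [] := by
      rw [List.dropWhile_eq_nil_iff]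
      intro x hx; exact (List.all_eq_true.mp h) x hx
    simp [this]

theorem cell_eq (lines : List String) (width r c : Nat) :
    (((lines.map (fun l => l.toList ++ List.replicate (width - l.toList.length) ' ')).getD r []).getD c ' ')
      = bCell lines r c := by
  unfold bCell
  by_cases hr : r < lines.length
  · have hrow : (lines.map (fun l => l.toList ++ List.replicate (width - l.toList.length) ' ')).getD r []
        = lines[r].toList ++ List.replicate (width - lines[r].toList.length) ' ' := by
      rw [List.getD_eq_getElem?_getD, List.getElem?_map, List.getElem?_eq_getElem hr]
      rfl
    have hline : lines.getD r "" = lines[r] := by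
      rw [List.getD_eq_getElem?_getD, List.getElem?_eq_getElem hr]
      rfl
    rw [hrow, hline]
    by_cases hc : c < lines[r].toList.length
    · rw [if_pos hc, List.getD_eq_getElem?_getD, List.getElem?_append_left hc,
        List.getD_eq_getElem?_getD]
    · rw [if_neg hc, List.getD_eq_getElem?_getD, List.getElem?_append_right (Nat.le_of_not_lt hc)]
      by_cases hcw : c - lines[r].toList.length < width - lines[r].toList.length
      · rw [List.getElem?_eq_getElem (by simpa using hcw)]
        simp
      · rw [List.getElem?_eq_none (by simpa using hcw)]
        rfl
  · have hrow : (lines.map (fun l => l.toList ++ List.replicate (width - l.toList.length) ' ')).getD r []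
        = [] := by
      rw [List.getD_eq_getElem?_getD, List.getElem?_eq_none (by simpa using hr)]
      rfl
    have hline : lines.getD r "" = "" := by
      rw [List.getD_eq_getElem?_getD, List.getElem?_eq_none (by simpa using hr)]
      rfl
    rw [hrow, hline]
    simp

theorem col_eq (lines : List String) (width c : Nat) :
    aCol (lines.map (fun l => l.toList ++ List.replicate (width - l.toList.length) ' '))
        ((lines.map (fun l => l.toList ++ List.replicate (width - l.toList.length) ' ')).length) c
      = bColStr lines lines.length c := by
  unfold aCol bColStr
  rw [List.length_map]
  congr 1
  exact List.map_congr_left (fun r _ => cell_eq lines width r c)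

theorem blank_bridge (lines : List String) (height c : Nat) :
    (PySem.Str.strip (bColStr lines height c) = "") ↔ bBlank lines height c = true := by
  unfold bColStr bBlank
  rw [← String.toList_eq_nil_iff, PySem.Str.toList_strip, String.toList_ofList, strip_eq_nil_iff]
  simp [List.all_map, Function.comp]

def aFinish (acc : List (List String) × List String) : List (List String) :=
  if acc.2 = [] then acc.1 else acc.1 ++ [acc.2]

theorem bRunEnd_blank (blanks : List Bool) (width c : Nat)
    (h : ¬ (c < width ∧ blanks.getD c true = false)) : bRunEnd blanks width c = c := by
  rw [bRunEnd, if_neg h]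

theorem bRunEnd_step (blanks : List Bool) (width c : Nat) (h1 : c < width)
    (h2 : blanks.getD c true = false) :
    bRunEnd blanks width c = bRunEnd blanks width (c + 1) := by
  rw [bRunEnd, if_pos ⟨h1, h2⟩]

-- the core simultaneous invariant: A's fold over the remaining columns, with empty or
-- non-empty `current`, against B's runs from column c
theorem main_inv (lines : List String) (width : Nat) :
    ∀ n c, width - c = n →
      (∀ g : List (List String),
        aFinish ((((List.range' c (width - c)).map (bColStr lines lines.length)).foldl aStep (g, []))) =
          g ++ (bRuns ((List.range width).map (bBlank lines lines.length)) width c).map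
              (bGroup lines lines.length)) ∧
      (∀ (g : List (List String)) (cur : List String), cur ≠ [] →
        aFinish ((((List.range' c (width - c)).map (bColStr lines lines.length)).foldl aStep (g, cur))) =
          g ++ (cur ++ (List.range' c
                (bRunEnd ((List.range width).map (bBlank lines lines.length)) width c - c)).map
                  (bColStr lines lines.length)) ::
            (bRuns ((List.range width).map (bBlank lines lines.length)) width
                (bRunEnd ((List.range width).map (bBlank lines lines.length)) width c)).map
              (bGroup lines lines.length)) := by
  intro n
  induction n with
  | zero =>
    intro c hc
    have hcw : ¬ c < width := by omega
    have hdrop : width - c = 0 := by omega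
    have hre : bRunEnd ((List.range width).map (bBlank lines lines.length)) width c = c :=
      bRunEnd_blank _ _ _ (by intro h; exact hcw h.1)
    constructor
    · intro g
      rw [bRuns, dif_neg hcw, hdrop]
      simp [aFinish]
    · intro g cur hcur
      rw [hre, bRuns, dif_neg hcw, hdrop]
      simp [aFinish, hcur]
  | succ n ih =>
    intro c hc
    have hcw : c < width := by omega
    have hblanks : ((List.range width).map (bBlank lines lines.length)).getD c true
        = bBlank lines lines.length c := by
      rw [List.getD_eq_getElem?_getD, List.getElem?_map, List.getElem?_range hcw]
      rfl
    have hrange : List.range' c (width - c) = c :: List.range' (c + 1) (width - (c + 1)) := by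
      have h1 : width - c = (width - (c + 1)) + 1 := by omega
      rw [h1, List.range'_succ]
    obtain ⟨ihP, ihQ⟩ := ih (c + 1) (by omega)
    by_cases hb : bBlank lines lines.length c = true
    · -- column c is blank
      have hstrip : PySem.Str.strip (bColStr lines lines.length c) = "" :=
        (blank_bridge lines lines.length c).mpr hb
      have hre : bRunEnd ((List.range width).map (bBlank lines lines.length)) width c = c :=
        bRunEnd_blank _ _ _ (by rw [hblanks, hb]; simp)
      have hruns : bRuns ((List.range width).map (bBlank lines lines.length)) width c
          = bRuns ((List.range width).map (bBlank lines lines.length)) width (c + 1) := by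
        rw [bRuns, dif_pos hcw, hblanks, if_pos hb]
      constructor
      · intro g
        rw [hrange, List.map_cons, List.foldl_cons]
        rw [show aStep (g, []) (bColStr lines lines.length c) = (g, []) by
          unfold aStep; simp [hstrip]]
        rw [ihP g, hruns]
      · intro g cur hcur
        rw [hrange, List.map_cons, List.foldl_cons]
        rw [show aStep (g, cur) (bColStr lines lines.length c) = (g ++ [cur], []) by
          unfold aStep; simp [hstrip, hcur]]
        rw [ihP (g ++ [cur]), hre, hruns]
        simp
    · -- column c is not blank
      have hb' : bBlank lines lines.length c = false := by
        revert hb; cases bBlank lines lines.length c <;> simp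
      have hstrip : ¬ PySem.Str.strip (bColStr lines lines.length c) = "" := by
        intro h
        exact hb ((blank_bridge lines lines.length c).mp h)
      have hre : bRunEnd ((List.range width).map (bBlank lines lines.length)) width c
          = bRunEnd ((List.range width).map (bBlank lines lines.length)) width (c + 1) :=
        bRunEnd_step _ _ _ hcw (by rw [hblanks, hb'])
      have hle : c + 1 ≤ bRunEnd ((List.range width).map (bBlank lines lines.length)) width (c + 1) :=
        bRunEnd_le _ _ _
      have hrangeRun : List.range' c
            (bRunEnd ((List.range width).map (bBlank lines lines.length)) width c - c)
          = c :: List.range' (c + 1)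
            (bRunEnd ((List.range width).map (bBlank lines lines.length)) width (c + 1) - (c + 1)) := by
        rw [hre]
        have h1 : bRunEnd ((List.range width).map (bBlank lines lines.length)) width (c + 1) - c
            = (bRunEnd ((List.range width).map (bBlank lines lines.length)) width (c + 1) - (c + 1)) + 1 := by
          omega
        rw [h1, List.range'_succ]
      have hruns : bRuns ((List.range width).map (bBlank lines lines.length)) width c
          = (c, bRunEnd ((List.range width).map (bBlank lines lines.length)) width c) ::
            bRuns ((List.range width).map (bBlank lines lines.length)) width
              (bRunEnd ((List.range width).map (bBlank lines lines.length)) width c) := by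
        rw [bRuns, dif_pos hcw, hblanks, if_neg (by simp [hb'])]
      constructor
      · intro g
        rw [hrange, List.map_cons, List.foldl_cons]
        rw [show aStep (g, []) (bColStr lines lines.length c) = (g, [bColStr lines lines.length c]) by
          unfold aStep; simp [hstrip]]
        rw [ihQ g [bColStr lines lines.length c] (by simp)]
        rw [hruns, List.map_cons]
        unfold bGroup
        simp only [hre]
        rw [show bRunEnd ((List.range width).map (bBlank lines lines.length)) width (c + 1) - c
            = (bRunEnd ((List.range width).map (bBlank lines lines.length)) width (c + 1) - (c + 1)) + 1
            from by omega,
          List.range'_succ]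
        simp
      · intro g cur hcur
        rw [hrange, List.map_cons, List.foldl_cons]
        rw [show aStep (g, cur) (bColStr lines lines.length c)
            = (g, cur ++ [bColStr lines lines.length c]) by
          unfold aStep; simp [hstrip]]
        rw [ihQ g (cur ++ [bColStr lines lines.length c]) (by simp)]
        rw [hrangeRun, hre]
        simp

-- ===== VERDICT (by name: the statement is the Claim_ definition above) =====
theorem transpose_and_group_spec : Claim_equal_transpose_and_group := by
  unfold Claim_equal_transpose_and_group
  intro lines _ _
  unfold Spec_transpose_and_group transpose_and_group transpose_and_group_alt
  dsimp only
  set width := (PySem.List.max? (lines.map (fun l : String => l.toList.length)) (fun n => n)).getD 0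
    with hw
  have hcols : (List.range width).map
      (aCol (lines.map (fun l => l.toList ++ List.replicate (width - l.toList.length) ' '))
        ((lines.map (fun l => l.toList ++ List.replicate (width - l.toList.length) ' ')).length))
      = (List.range' 0 (width - 0)).map (bColStr lines lines.length) := by
    rw [Nat.sub_zero, ← List.range_eq_range']
    exact List.map_congr_left (fun c _ => col_eq lines width c)
  obtain ⟨P, _⟩ := main_inv lines width (width - 0) 0 rfl
  have hP := P []
  rw [List.nil_append] at hP
  show aFinish _ = _
  rw [hcols]
  exact hP
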